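-- pv_equiv track=rewrite | github.com/conganhhcmus/Codelearn.io | sasuke 34/I.py | longest_array
-- ===== SOURCE A (Python) =====
-- import math as mt
--
-- def longest_array(a):
--     n = len(a)
--     MAX = 100001
--     prime = [0 for i in range(MAX + 1)]
--     countdiv = [0 for i in range(MAX + 1)]
--     for i in range(2, int(mt.ceil(1+mt.sqrt(MAX + 1)))):
--
--         if (prime[i] == 0):
--             for j in range(i * 2, MAX + 1, i):
--                 prime[j] = i
--
--     # Prime number will have same divisor
--     for i in range(1, MAX):
--         if (prime[i] == 0):
--             prime[i] = i
--     ans = 0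
--     for i in range(n):
--
--         element = a[i]
--
--         # Fetch total unique prime
--         # divisor of element
--         while (element > 1):
--
--             div = prime[element]
--
--             # Increment count[] of Every
--             # unique divisor we get till now
--             countdiv[div] += 1
--
--             # Find maximum frequency of divisor
--             ans = max(ans, countdiv[div])
--
--             while (element % div == 0):
--                 element = element // div
--
--     return ans
-- ===== SOURCE B (Python) =====
-- def longest_array(a):
--     counts = {}
--     best = 0
--     for x in a:
--         m = x
--         d = 2
--         while d * d <= m:
--             if m % d == 0:
--                 c = counts.get(d, 0) + 1
--                 counts[d] = c
--                 if c > best: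
--                     best = c
--                 while m % d == 0:
--                     m //= d
--             d += 1
--         if m > 1:
--             c = counts.get(m, 0) + 1
--             counts[m] = c
--             if c > best:
--                 best = c
--     return best
-- ===== Notes on version B (the rewrite author's own statement) =====
-- stated objective: alternative
-- what changed: A builds a global 100002-entry sieve table (largest small-prime-factor array) and looks each element's prime divisors up in it; B drops the table entirely and factors each element independently by trial division up to sqrt(m), counting each distinct prime in a dict and tracking the running maximum.
-- crash fix: On any list containing an element > 100001, A raises IndexError (it overruns its fixed-size sieve table) while B just factors the element and returns the maximum prime-divisor frequency. — e.g. on longest_array([100003]): A raises IndexError, B returns 1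
import Mathlib
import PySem

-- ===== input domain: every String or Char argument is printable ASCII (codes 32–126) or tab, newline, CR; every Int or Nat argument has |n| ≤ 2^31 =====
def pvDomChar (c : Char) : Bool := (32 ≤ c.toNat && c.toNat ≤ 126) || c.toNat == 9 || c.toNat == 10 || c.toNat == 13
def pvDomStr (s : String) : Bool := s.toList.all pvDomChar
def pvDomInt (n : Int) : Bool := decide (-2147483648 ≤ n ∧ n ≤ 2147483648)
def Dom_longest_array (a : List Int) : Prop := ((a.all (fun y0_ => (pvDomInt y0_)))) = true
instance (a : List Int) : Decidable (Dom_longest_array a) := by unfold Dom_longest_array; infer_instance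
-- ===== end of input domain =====

-- B replaces A's global 100002-entry sieve table with per-element trial division (no table);
-- objective: alternative algorithm of similar cost on the admitted domain.
-- Both ports keep all loop state in ℕ: every value A/B loop over is a nonnegative Python int
-- (the `element > 1` / `d*d <= m` guards skip nonpositive elements, whose `.toNat` image 0
-- behaves identically), and `%`/`//` on nonnegative ints are Nat.mod/Nat.div exactly.

-- ===== PORT A =====
-- helper: `for j in range(i*2, MAX+1, i): prime[j] = i`  (range(a,b,i) has ceil((b-a)/i) terms)
def pvMarkMults (i : ℕ) (pr : Array ℕ) : Array ℕ :=
  (List.range' (2*i) ((100002 - 2*i + (i-1)) / i) i).foldl (fun p j => p.setIfInBounds j i) pr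

-- helper: first sieve loop, `for i in range(2, 318)` (int(ceil(1+sqrt(100002))) == 318)
def pvSieve1 : Array ℕ :=
  (List.range' 2 316).foldl
    (fun pr i => if pr.getD i 0 = 0 then pvMarkMults i pr else pr)
    (Array.replicate 100002 0)

-- helper: second loop, `for i in range(1, MAX): if prime[i]==0: prime[i] = i`
def pvPrimeTab : Array ℕ :=
  (List.range' 1 100000).foldl
    (fun pr i => if pr.getD i 0 = 0 then pr.setIfInBounds i i else pr) pvSieve1

-- helper: `while element % div == 0: element = element // div`  (fuel > element suffices)
def pvStripA : ℕ → ℕ → ℕ → ℕ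
  | 0, e, _ => e
  | f+1, e, d => if e % d = 0 then pvStripA f (e / d) d else e

-- helper: `while element > 1: ...`  (fuel > element suffices: element strictly decreases)
def pvProcA (tab : Array ℕ) : ℕ → ℕ → Array ℕ × ℕ → Array ℕ × ℕ
  | 0, _, st => st
  | f+1, e, (cd, ans) =>
    if 1 < e then
      let dv := tab.getD e 0
      let cd' := cd.setIfInBounds dv (cd.getD dv 0 + 1)
      let ans' := max ans (cd'.getD dv 0)
      pvProcA tab f (pvStripA (e+1) e dv) (cd', ans')
    else (cd, ans)

def longest_array (a : List Int) : Int :=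
  let tab := pvPrimeTab
  ((a.foldl (fun st x => pvProcA tab (x.toNat + 1) x.toNat st)
      ((Array.replicate 100002 0 : Array ℕ), 0)).2 : ℕ)

-- ===== PORT B =====
-- helper: `while m % d == 0: m //= d`
def pvStripB : ℕ → ℕ → ℕ → ℕ
  | 0, m, _ => m
  | f+1, m, d => if m % d = 0 then pvStripB f (m / d) d else m

-- helper: `c = counts.get(p,0)+1; counts[p] = c; if c > best: best = c`
def pvRecordB (p : ℕ) (st : PySem.Dict ℕ ℕ × ℕ) : PySem.Dict ℕ ℕ × ℕ :=
  let c := st.1.getD p 0 + 1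
  (st.1.insert p c, if st.2 < c then c else st.2)

-- helper: `while d*d <= m: ...`; returns the final m with the updated state
def pvTrialB : ℕ → ℕ → ℕ → PySem.Dict ℕ ℕ × ℕ → ℕ × (PySem.Dict ℕ ℕ × ℕ)
  | 0, m, _, st => (m, st)
  | f+1, m, d, st =>
    if d * d ≤ m then
      if m % d = 0 then pvTrialB f (pvStripB (m+1) m d) (d+1) (pvRecordB d st)
      else pvTrialB f m (d+1) st
    else (m, st)

-- helper: `if m > 1:` after the loop
def pvFinishB (r : ℕ × (PySem.Dict ℕ ℕ × ℕ)) : PySem.Dict ℕ ℕ × ℕ :=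
  if 1 < r.1 then pvRecordB r.1 r.2 else r.2

def longest_array_alt (a : List Int) : Int :=
  ((a.foldl (fun st x => pvFinishB (pvTrialB (x.toNat + 2) x.toNat 2 st))
      (PySem.Dict.empty, 0)).2 : ℕ)

-- ===== PRECONDITION & SPEC =====
-- Pre_ excludes exactly the inputs on which A raises IndexError: any element > 100001
-- overruns A's fixed 100002-entry sieve table.
def Pre_longest_array (a : List Int) : Prop := ∀ x ∈ a, x ≤ 100001
instance (a : List Int) : Decidable (Pre_longest_array a) := by
  unfold Pre_longest_array; infer_instance
def pvWitness_longest_array : List Int := [12, 35, -3, 100001]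

-- On lists containing an element > 100001, A raises IndexError (sieve-table overrun) while B
-- simply factors the element by trial division and returns the max frequency.
def Raises_longest_array (a : List Int) : Prop := ∃ x ∈ a, 100001 < x
instance (a : List Int) : Decidable (Raises_longest_array a) := by
  unfold Raises_longest_array; infer_instance
def pvRaiseWitness_longest_array : List Int := [100003]
def pvRaiseWitnessOut_longest_array : Int := 1

def Spec_longest_array (a : List Int) (out : Int) : Prop := out = longest_array_alt a
instance (a : List Int) (out : Int) : Decidable (Spec_longest_array a out) := by
  unfold Spec_longest_array; infer_instance

-- ===== CLAIM (what is proved, stated in full; the proofs are below) =====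
def Claim_equal_longest_array : Prop :=
  ∀ (a : List Int), Dom_longest_array a → Pre_longest_array a →
    Spec_longest_array a (longest_array a)

def Claim_raises_longest_array : Prop :=
  (∀ (a : List Int), Dom_longest_array a → Raises_longest_array a → ¬ Pre_longest_array a) ∧
  (Dom_longest_array (pvRaiseWitness_longest_array) ∧
   Raises_longest_array (pvRaiseWitness_longest_array) ∧
   longest_array_alt (pvRaiseWitness_longest_array) = pvRaiseWitnessOut_longest_array)

-- ===== LEMMAS AND PROOFS =====

-- the common abstract model: the multiset of all (element, distinct-prime-factor) hits,
-- and the answer = the largest multiplicity in it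
def pvF (M : Multiset ℕ) : ℕ := M.toFinset.sup fun p => M.count p

def pvMtot (a : List Int) : Multiset ℕ := (a.map fun x => (x.toNat.primeFactors).val).sum

def pvInvA (st : Array ℕ × ℕ) (M : Multiset ℕ) : Prop :=
  st.1.size = 100002 ∧ (∀ p ∈ M, p < 100002) ∧
  (∀ p, p < 100002 → st.1.getD p 0 = M.count p) ∧ (st.2 : ℕ) = pvF M

def pvInvB (st : PySem.Dict ℕ ℕ × ℕ) (M : Multiset ℕ) : Prop :=
  (∀ p : ℕ, st.1.getD p 0 = M.count p) ∧ st.2 = pvF M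

lemma pvF_cons (p : ℕ) (M : Multiset ℕ) : pvF (p ::ₘ M) = max (M.count p + 1) (pvF M) := by
  unfold pvF
  rw [Multiset.toFinset_cons, Finset.sup_insert, Multiset.count_cons_self]
  have le1 : (M.toFinset.sup fun q => M.count q) ≤ M.toFinset.sup fun q => (p ::ₘ M).count q := by
    apply Finset.sup_mono_fun
    intro b _
    rw [Multiset.count_cons]
    split <;> omega
  have le2 : (M.toFinset.sup fun q => (p ::ₘ M).count q)
      ≤ max (M.count p + 1) (M.toFinset.sup fun q => M.count q) := by
    apply Finset.sup_le
    intro b hb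
    rw [Multiset.count_cons]
    by_cases hbp : b = p
    · subst hbp; simp
    · rw [if_neg hbp, add_zero]
      exact le_max_of_le_right (by simpa using Finset.le_sup (f := fun q => M.count q) hb)
  omega

lemma pvSetGet (a : Array ℕ) (i v x : ℕ) :
    (a.setIfInBounds i v).getD x 0 = if x = i ∧ i < a.size then v else a.getD x 0 := by
  simp [Array.getD_eq_getD_getElem?, Array.getElem?_setIfInBounds]
  split_ifs <;> simp_all

lemma pvFoldSet_size (l : List ℕ) (v : ℕ) (pr : Array ℕ) :
    (l.foldl (fun p j => p.setIfInBounds j v) pr).size = pr.size := by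
  induction l generalizing pr with
  | nil => rfl
  | cons j t ih => simp [List.foldl_cons, ih, Array.size_setIfInBounds]

lemma pvFoldSet_getD (l : List ℕ) (v : ℕ) (pr : Array ℕ) (x : ℕ) :
    (l.foldl (fun p j => p.setIfInBounds j v) pr).getD x 0 =
      if x ∈ l ∧ x < pr.size then v else pr.getD x 0 := by
  induction l generalizing pr with
  | nil => simp
  | cons j t ih =>
    rw [List.foldl_cons, ih, Array.size_setIfInBounds, pvSetGet]
    by_cases hx : x < pr.size
    · by_cases hm : x ∈ t
      · simp [hm, hx]
      · by_cases hj : x = j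
        · subst hj; simp [hm, hx]
        · simp [hm, hx, hj]
    · simp [hx]
      intro hxj hjs
      omega

lemma pvMemMark (i x : ℕ) (hi : 1 ≤ i) :
    x ∈ List.range' (2*i) ((100002 - 2*i + (i-1)) / i) i ↔
      (i ∣ x ∧ 2*i ≤ x ∧ x < 100002) := by
  rw [List.mem_range']
  constructor
  · rintro ⟨k, hk, rfl⟩
    refine ⟨⟨2 + k, by ring⟩, by omega, ?_⟩
    have h1 : k + 1 ≤ (100002 - 2*i + (i-1)) / i := hk
    rw [Nat.le_div_iff_mul_le (by omega)] at h1
    have h2 : (k+1)*i = i*k + i := by ring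
    omega
  · rintro ⟨⟨c, rfl⟩, hge, hlt⟩
    have hc : 2 ≤ c := by
      rcases Nat.lt_or_ge c 2 with h | h
      · interval_cases c <;> omega
      · exact h
    have h5 : (c - 2 + 1) * i + i = c * i := by
      have h6 : c - 2 + 1 + 1 = c := by omega
      calc (c-2+1)*i + i = (c-2+1+1)*i := by ring
        _ = c*i := by rw [h6]
    have h7 : c * i = i * c := Nat.mul_comm c i
    have h8 : i * (c-2) + i * 2 = i * c := by
      rw [← Nat.mul_add]
      congr 1
      omega
    refine ⟨c - 2, ?_, by omega⟩
    rw [Nat.lt_iff_add_one_le, Nat.le_div_iff_mul_le (by omega)]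
    omega

lemma pvMark_size (i : ℕ) (pr : Array ℕ) : (pvMarkMults i pr).size = pr.size :=
  pvFoldSet_size _ _ _

lemma pvMark_getD (i : ℕ) (hi : 1 ≤ i) (pr : Array ℕ) (hs : pr.size = 100002) (x : ℕ) :
    (pvMarkMults i pr).getD x 0 =
      if i ∣ x ∧ 2*i ≤ x ∧ x < 100002 then i else pr.getD x 0 := by
  rw [pvMarkMults, pvFoldSet_getD, hs]
  by_cases h : i ∣ x ∧ 2*i ≤ x ∧ x < 100002
  · simp [h, (pvMemMark i x hi).mpr h]
  · rw [if_neg, if_neg h]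
    intro ⟨hmem, _⟩
    exact h ((pvMemMark i x hi).mp hmem)

-- invariant carried through the first sieve loop, boundary b = first unprocessed i
def pvQ (pr : Array ℕ) (b : ℕ) : Prop :=
  pr.size = 100002 ∧
  (∀ x, x < 100002 → pr.getD x 0 = 0 ∨ ((pr.getD x 0).Prime ∧ pr.getD x 0 ∣ x)) ∧
  (∀ p, p < 100002 → p.Prime → pr.getD p 0 = 0) ∧
  (∀ x, x < 100002 → 2 ≤ x → ¬ x.Prime → x.minFac < b → pr.getD x 0 ≠ 0)

lemma pvMinFacLtSelf (i : ℕ) (hi : 2 ≤ i) (hnp : ¬ i.Prime) : i.minFac < i := by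
  have hle := Nat.minFac_le (n := i) (by omega)
  rcases Nat.lt_or_ge (i.minFac) i with h | h
  · exact h
  · exact absurd (Nat.prime_def_minFac.mpr ⟨hi, by omega⟩) hnp

lemma pvQ_step (pr : Array ℕ) (i : ℕ) (hi : 2 ≤ i) (hi' : i ≤ 317) (hQ : pvQ pr i) :
    pvQ (if pr.getD i 0 = 0 then pvMarkMults i pr else pr) (i+1) := by
  obtain ⟨hsz, h2, h3, h4⟩ := hQ
  by_cases hc : pr.getD i 0 = 0
  · rw [if_pos hc]
    -- the branch is taken only at prime i
    have hip : i.Prime := by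
      by_contra hnp
      exact (h4 i (by omega) hi hnp (pvMinFacLtSelf i hi hnp)) hc
    refine ⟨(pvMark_size i pr).trans hsz, ?_, ?_, ?_⟩
    · intro x hx
      rw [pvMark_getD i (by omega) pr hsz]
      split
      · rename_i hcond
        exact Or.inr ⟨hip, hcond.1⟩
      · exact h2 x hx
    · intro p hp hpp
      rw [pvMark_getD i (by omega) pr hsz]
      rw [if_neg, h3 p hp hpp]
      rintro ⟨hdvd, hge, -⟩
      rcases (Nat.Prime.eq_one_or_self_of_dvd hpp i hdvd) with h | h
      · omega
      · omega
    · intro x hx hx2 hnp hmf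
      rw [pvMark_getD i (by omega) pr hsz]
      rcases Nat.lt_or_ge (x.minFac) i with hlt | hge
      · have hold := h4 x hx hx2 hnp hlt
        split
        · omega
        · exact hold
      · have heq : x.minFac = i := by omega
        obtain ⟨c, hcx⟩ := Nat.minFac_dvd x
        rw [heq] at hcx
        have hc2 : 2 ≤ c := by
          rcases Nat.lt_or_ge c 2 with h | h
          · interval_cases c
            · omega
            · exfalso; exact hnp (by rw [hcx, Nat.mul_one]; exact heq ▸ Nat.minFac_prime (by omega))
          · exact h
        have hge2 : 2*i ≤ x := by
          calc 2*i = i*2 := by ring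
            _ ≤ i*c := Nat.mul_le_mul_left i hc2
            _ = x := hcx.symm
        rw [if_pos ⟨heq ▸ Nat.minFac_dvd x, hge2, hx⟩]
        omega
  · rw [if_neg hc]
    refine ⟨hsz, h2, h3, ?_⟩
    intro x hx hx2 hnp hmf
    rcases Nat.lt_or_ge (x.minFac) i with hlt | hge
    · exact h4 x hx hx2 hnp hlt
    · have heq : x.minFac = i := by omega
      have hip : i.Prime := heq ▸ Nat.minFac_prime (by omega)
      exact absurd (h3 i (by omega) hip) hc

lemma pvQ_fold (n lo : ℕ) (pr : Array ℕ) (hlo : 2 ≤ lo) (hn : lo + n ≤ 318) (hQ : pvQ pr lo) :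
    pvQ ((List.range' lo n).foldl
          (fun pr i => if pr.getD i 0 = 0 then pvMarkMults i pr else pr) pr) (lo+n) := by
  induction n generalizing lo pr with
  | zero => exact hQ
  | succ n ih =>
    rw [List.range'_succ, List.foldl_cons]
    have h := ih (lo+1) _ (by omega) (by omega) (pvQ_step pr lo hlo (by omega) hQ)
    have e : lo + 1 + n = lo + (n+1) := by omega
    rwa [e] at h

lemma pvSieve1_spec : pvQ pvSieve1 318 := by
  have h0 : pvQ (Array.replicate 100002 0) 2 := by
    refine ⟨Array.size_replicate, ?_, ?_, ?_⟩
    · intro x hx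
      simp [Array.getD_eq_getD_getElem?, hx]
    · intro p hp _
      simp [Array.getD_eq_getD_getElem?, hp]
    · intro x _ hx2 _ hmf
      have := (Nat.minFac_prime (n := x) (by omega)).two_le
      omega
  exact pvQ_fold 316 2 _ (by omega) (by omega) h0

lemma pvLoop2_getD (l : List ℕ) (pr : Array ℕ) (hl : ∀ j ∈ l, 1 ≤ j ∧ j < 100002)
    (hs : pr.size = 100002) (x : ℕ) :
    ((l.foldl (fun pr i => if pr.getD i 0 = 0 then pr.setIfInBounds i i else pr) pr)).getD x 0
      = if x ∈ l ∧ pr.getD x 0 = 0 then x else pr.getD x 0 := by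
  induction l generalizing pr with
  | nil => simp
  | cons j t ih =>
    have hj := hl j (List.mem_cons_self)
    rw [List.foldl_cons]
    by_cases hj0 : pr.getD j 0 = 0
    · rw [if_pos hj0, ih _ (fun y hy => hl y (List.mem_cons_of_mem j hy))
        (by rw [Array.size_setIfInBounds]; exact hs)]
      by_cases hxj : x = j
      · subst hxj
        have hv : (pr.setIfInBounds x x).getD x 0 = x := by
          rw [pvSetGet, if_pos ⟨rfl, by omega⟩]
        rw [hv, ite_self, if_pos ⟨List.mem_cons_self, hj0⟩]
      · have hv : (pr.setIfInBounds j j).getD x 0 = pr.getD x 0 := by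
          rw [pvSetGet, if_neg (by tauto)]
        rw [hv]
        simp [List.mem_cons, hxj]
    · rw [if_neg hj0, ih _ (fun y hy => hl y (List.mem_cons_of_mem j hy)) hs]
      by_cases hxj : x = j
      · subst hxj
        rw [if_neg (fun h => hj0 h.2), if_neg (fun h => hj0 h.2)]
      · simp [List.mem_cons, hxj]

lemma pvTab_spec (x : ℕ) (h2 : 2 ≤ x) (hx : x ≤ 100001) :
    (pvPrimeTab.getD x 0).Prime ∧ pvPrimeTab.getD x 0 ∣ x := by
  obtain ⟨hsz, hP2, hP3, hP4⟩ := pvSieve1_spec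
  have hget : pvPrimeTab.getD x 0 =
      if x ∈ List.range' 1 100000 ∧ pvSieve1.getD x 0 = 0 then x else pvSieve1.getD x 0 := by
    rw [pvPrimeTab]
    exact pvLoop2_getD _ _ (fun j hj => by rw [List.mem_range'_1] at hj; omega) hsz x
  by_cases h0 : pvSieve1.getD x 0 = 0
  · have hxp : x.Prime := by
      by_contra hnp
      have hlt : x.minFac < 318 := by
        have hs1 := Nat.minFac_sq_le_self (n := x) (by omega) hnp
        rw [pow_two] at hs1
        rcases Nat.lt_or_ge (x.minFac) 318 with h | h
        · exact h
        · have : 318*318 ≤ x.minFac * x.minFac := Nat.mul_le_mul h h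
          omega
      exact absurd h0 (hP4 x (by omega) h2 hnp hlt)
    have hx1 : x ≤ 100000 := by
      rcases Nat.lt_or_ge x 100001 with h | h
      · omega
      · exfalso
        have : x = 100001 := by omega
        rw [this] at hxp
        exact (by norm_num : ¬ Nat.Prime 100001) hxp
    rw [hget, if_pos ⟨by rw [List.mem_range'_1]; omega, h0⟩]
    exact ⟨hxp, dvd_refl x⟩
  · rw [hget, if_neg (fun h => h0 h.2)]
    rcases hP2 x (by omega) with h | h
    · exact absurd h h0
    · exact h

lemma pvStripA_spec (f e d : ℕ) (hd : d.Prime) (he : 1 ≤ e) (hf : e < f) :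
    1 ≤ pvStripA f e d ∧ pvStripA f e d ≤ e ∧ pvStripA f e d ∣ e ∧ ¬ d ∣ pvStripA f e d ∧
      (pvStripA f e d).primeFactors = e.primeFactors.erase d ∧
      (d ∣ e → pvStripA f e d < e) := by
  induction f generalizing e with
  | zero => omega
  | succ f ih =>
    rw [pvStripA]
    by_cases h : e % d = 0
    · rw [if_pos h]
      have hd2 := hd.two_le
      have hdvd : d ∣ e := Nat.dvd_iff_mod_eq_zero.mpr h
      have hde : d ≤ e := Nat.le_of_dvd (by omega) hdvd
      have he' : 1 ≤ e / d := (Nat.one_le_div_iff (by omega)).mpr hde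
      have hlt : e / d < e := Nat.div_lt_self (by omega) (by omega)
      obtain ⟨i1, i2, i3, i4, i5, -⟩ := ih (e / d) he' (by omega)
      have hmul : e / d * d = e := Nat.div_mul_cancel hdvd
      have hpf : e.primeFactors = (e / d).primeFactors ∪ {d} := by
        conv_lhs => rw [← hmul]
        rw [Nat.primeFactors_mul (by omega) (by omega), hd.primeFactors]
      refine ⟨i1, by omega, i3.trans (Nat.div_dvd_of_dvd hdvd), i4, ?_, fun _ => by omega⟩
      rw [i5, hpf, Finset.erase_union_distrib, Finset.erase_singleton, Finset.union_empty]
    · rw [if_neg h]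
      have hnd : ¬ d ∣ e := fun hdv => h (Nat.dvd_iff_mod_eq_zero.mp hdv)
      refine ⟨he, le_refl e, dvd_refl e, hnd, ?_, fun hdv => absurd hdv hnd⟩
      rw [Finset.erase_eq_of_notMem]
      intro hmem
      exact hnd (Nat.mem_primeFactors.mp hmem).2.1

lemma pvStripB_eq (f e d : ℕ) : pvStripB f e d = pvStripA f e d := by
  induction f generalizing e with
  | zero => rfl
  | succ f ih => simp only [pvStripA, pvStripB]; split <;> simp [ih]

lemma pvRecA (cd : Array ℕ) (ans : ℕ) (M : Multiset ℕ) (p : ℕ)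
    (hInv : pvInvA (cd, ans) M) (hp : p < 100002) :
    pvInvA (cd.setIfInBounds p (cd.getD p 0 + 1),
            max ans ((cd.setIfInBounds p (cd.getD p 0 + 1)).getD p 0)) (p ::ₘ M) := by
  obtain ⟨hsz, hmem, hcnt, hans⟩ := hInv
  dsimp only at hsz hcnt hans
  have hget : (cd.setIfInBounds p (cd.getD p 0 + 1)).getD p 0 = M.count p + 1 := by
    rw [pvSetGet, if_pos ⟨rfl, by omega⟩, hcnt p hp]
  refine ⟨by rw [Array.size_setIfInBounds]; exact hsz, ?_, ?_, ?_⟩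
  · intro q hq
    rcases Multiset.mem_cons.mp hq with h | h
    · omega
    · exact hmem q h
  · intro q hq
    rw [pvSetGet]
    by_cases hqp : q = p
    · subst hqp
      rw [if_pos ⟨rfl, by omega⟩, Multiset.count_cons_self, hcnt q hq]
    · rw [if_neg (by tauto), hcnt q hq, Multiset.count_cons_of_ne hqp]
  · rw [hget, hans, pvF_cons]
    rw [Nat.max_def, Nat.max_def]
    split_ifs <;> omega

lemma pvRecB (st : PySem.Dict ℕ ℕ × ℕ) (M : Multiset ℕ) (p : ℕ) (hInv : pvInvB st M) :
    pvInvB (pvRecordB p st) (p ::ₘ M) := by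
  obtain ⟨hcnt, hbest⟩ := hInv
  unfold pvRecordB
  refine ⟨?_, ?_⟩
  · intro q
    rw [PySem.Dict.getD_insert]
    by_cases hqp : q = p
    · subst hqp
      rw [if_pos rfl, Multiset.count_cons_self, hcnt q]
    · rw [if_neg hqp, hcnt q, Multiset.count_cons_of_ne hqp]
  · simp only [hcnt p, hbest, pvF_cons]
    rw [Nat.max_def]
    split_ifs <;> omega

lemma pvProcA_inv (tab : Array ℕ)
    (htab : ∀ x, 2 ≤ x → x ≤ 100001 → (tab.getD x 0).Prime ∧ tab.getD x 0 ∣ x)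
    (f e : ℕ) (st : Array ℕ × ℕ) (M : Multiset ℕ)
    (he : e ≤ 100001) (hf : e < f) (hInv : pvInvA st M) :
    pvInvA (pvProcA tab f e st) (M + (e.primeFactors).val) := by
  induction f generalizing e st M with
  | zero => omega
  | succ f ih =>
    obtain ⟨cd, ans⟩ := st
    by_cases he2 : 1 < e
    · obtain ⟨hdvp, hdvd⟩ := htab e he2 he
      have hdv2 := hdvp.two_le
      have hdve : tab.getD e 0 ≤ e := Nat.le_of_dvd (by omega) hdvd
      obtain ⟨i1, i2, i3, i4, i5, i6⟩ :=
        pvStripA_spec (e+1) e (tab.getD e 0) hdvp (by omega) (by omega)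
      have hrec := pvRecA cd ans M (tab.getD e 0) hInv (by omega)
      have hr := ih (pvStripA (e+1) e (tab.getD e 0)) _ _ (by omega) (by omega) hrec
      have hM : ((tab.getD e 0) ::ₘ M) + (pvStripA (e+1) e (tab.getD e 0)).primeFactors.val
          = M + e.primeFactors.val := by
        have hmem : tab.getD e 0 ∈ e.primeFactors :=
          Nat.mem_primeFactors.mpr ⟨hdvp, hdvd, by omega⟩
        have h2 : e.primeFactors.val
            = (tab.getD e 0) ::ₘ e.primeFactors.val.erase (tab.getD e 0) :=
          (Multiset.cons_erase (Finset.mem_val.mpr hmem)).symm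
        rw [i5, Finset.erase_val, Multiset.cons_add]
        conv_rhs => rw [h2]
        rw [Multiset.add_cons]
      rw [hM] at hr
      simpa [pvProcA, if_pos he2] using hr
    · have hpf : e.primeFactors = ∅ := by
        interval_cases e
        · exact Nat.primeFactors_zero
        · exact Nat.primeFactors_one
      simp only [pvProcA, if_neg he2, hpf]
      simpa using hInv

lemma pvTrialB_inv (f m d : ℕ) (st : PySem.Dict ℕ ℕ × ℕ) (M : Multiset ℕ)
    (hd : 2 ≤ d) (hmin : ∀ k, 2 ≤ k → k < d → ¬ k ∣ m) (hf : m + 2 ≤ f + d)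
    (hInv : pvInvB st M) :
    pvInvB (pvFinishB (pvTrialB f m d st)) (M + (m.primeFactors).val) := by
  induction f generalizing m d st M with
  | zero =>
    have hm1 : m ≤ 1 := by
      by_contra h
      exact hmin m (by omega) (by omega) (dvd_refl m)
    have hpf : m.primeFactors = ∅ := by
      interval_cases m
      · exact Nat.primeFactors_zero
      · exact Nat.primeFactors_one
    simp only [pvTrialB, pvFinishB]
    rw [if_neg (by omega), hpf]
    simpa using hInv
  | succ f ih =>
    by_cases hc : d * d ≤ m
    · have hm2 : 2 ≤ m := by nlinarith
      by_cases hdm : m % d = 0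
      · have hdvd : d ∣ m := Nat.dvd_iff_mod_eq_zero.mpr hdm
        have hdmin : m.minFac = d := by
          have h1 : m.minFac ≤ d := Nat.minFac_le_of_dvd hd hdvd
          have h2 : d ≤ m.minFac := by
            by_contra h
            exact hmin m.minFac (Nat.minFac_prime (by omega)).two_le (by omega) (Nat.minFac_dvd m)
          omega
        have hdp : d.Prime := hdmin ▸ Nat.minFac_prime (by omega)
        obtain ⟨i1, i2, i3, i4, i5, i6⟩ := pvStripA_spec (m+1) m d hdp (by omega) (by omega)
        rw [← pvStripB_eq] at i1 i2 i3 i4 i5 i6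
        have hlt := i6 hdvd
        have hrec := pvRecB st M d hInv
        have hr := ih (pvStripB (m+1) m d) (d+1) _ _ (by omega)
          (fun k hk2 hkd hkdvd => by
            rcases Nat.lt_or_ge k d with h | h
            · exact hmin k hk2 h (hkdvd.trans i3)
            · have : k = d := by omega
              subst this
              exact i4 hkdvd)
          (by omega) hrec
        have hM : (d ::ₘ M) + (pvStripB (m+1) m d).primeFactors.val
            = M + m.primeFactors.val := by
          have hmem : d ∈ m.primeFactors := Nat.mem_primeFactors.mpr ⟨hdp, hdvd, by omega⟩
          have h2 : m.primeFactors.val = d ::ₘ m.primeFactors.val.erase d :=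
            (Multiset.cons_erase (Finset.mem_val.mpr hmem)).symm
          rw [i5, Finset.erase_val, Multiset.cons_add]
          conv_rhs => rw [h2]
          rw [Multiset.add_cons]
        rw [hM] at hr
        simpa [pvTrialB, if_pos hc, if_pos hdm] using hr
      · have hr := ih m (d+1) st M (by omega)
          (fun k hk2 hkd hkdvd => by
            rcases Nat.lt_or_ge k d with h | h
            · exact hmin k hk2 h hkdvd
            · have : k = d := by omega
              subst this
              exact hdm (Nat.dvd_iff_mod_eq_zero.mp hkdvd))
          (by omega) hInv
        simpa [pvTrialB, if_pos hc, if_neg hdm] using hr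
    · simp only [pvTrialB]
      rw [if_neg hc]
      unfold pvFinishB
      by_cases hm2 : 1 < m
      · rw [if_pos hm2]
        have hmp : m.Prime := by
          by_contra hnp
          have h1 : d ≤ m.minFac := by
            by_contra h
            exact hmin m.minFac (Nat.minFac_prime (by omega)).two_le (by omega) (Nat.minFac_dvd m)
          have h2 := Nat.minFac_sq_le_self (n := m) (by omega) hnp
          rw [pow_two] at h2
          have h3 : d * d ≤ m.minFac * m.minFac := Nat.mul_le_mul h1 h1
          omega
        have hpf : m.primeFactors = {m} := hmp.primeFactors
        rw [hpf]
        have : M + ({m} : Finset ℕ).val = m ::ₘ M := by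
          show M + ({m} : Multiset ℕ) = m ::ₘ M
          rw [add_comm, Multiset.singleton_add]
        rw [this]
        exact pvRecB st M m hInv
      · rw [if_neg hm2]
        have hpf : m.primeFactors = ∅ := by
          interval_cases m
          · exact Nat.primeFactors_zero
          · exact Nat.primeFactors_one
        rw [hpf]
        simpa using hInv

lemma pvFoldA (l : List Int) (st : Array ℕ × ℕ) (M : Multiset ℕ)
    (hl : ∀ x ∈ l, x ≤ 100001) (hInv : pvInvA st M) :
    pvInvA (l.foldl (fun st x => pvProcA pvPrimeTab (x.toNat + 1) x.toNat st) st)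
      (M + pvMtot l) := by
  induction l generalizing st M with
  | nil => simpa [pvMtot] using hInv
  | cons x t iht =>
    rw [List.foldl_cons]
    have hx : x.toNat ≤ 100001 := by
      have := hl x List.mem_cons_self
      omega
    have h1 := pvProcA_inv pvPrimeTab pvTab_spec (x.toNat+1) x.toNat st M hx (by omega) hInv
    have h2 := iht _ _ (fun y hy => hl y (List.mem_cons_of_mem x hy)) h1
    have h3 : M + (x.toNat.primeFactors).val + pvMtot t = M + pvMtot (x :: t) := by
      simp [pvMtot, add_assoc]
    rwa [h3] at h2

lemma pvFoldB (l : List Int) (st : PySem.Dict ℕ ℕ × ℕ) (M : Multiset ℕ)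
    (hInv : pvInvB st M) :
    pvInvB (l.foldl (fun st x => pvFinishB (pvTrialB (x.toNat + 2) x.toNat 2 st)) st)
      (M + pvMtot l) := by
  induction l generalizing st M with
  | nil => simpa [pvMtot] using hInv
  | cons x t iht =>
    rw [List.foldl_cons]
    have h1 := pvTrialB_inv (x.toNat + 2) x.toNat 2 st M (by omega)
      (fun k hk2 hkd _ => by omega) (by omega) hInv
    have h2 := iht _ _ h1
    have h3 : M + (x.toNat.primeFactors).val + pvMtot t = M + pvMtot (x :: t) := by
      simp [pvMtot, add_assoc]
    rwa [h3] at h2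

lemma pvA_val (a : List Int) (h : ∀ x ∈ a, x ≤ 100001) :
    longest_array a = ((pvF (pvMtot a) : ℕ) : Int) := by
  have h0 : pvInvA ((Array.replicate 100002 0 : Array ℕ), (0:ℕ)) 0 := by
    refine ⟨Array.size_replicate, by simp, ?_, by simp [pvF]⟩
    intro p hp
    simp [Array.getD_eq_getD_getElem?, hp]
  have hfin := pvFoldA a _ 0 h h0
  rw [zero_add] at hfin
  show ((a.foldl (fun st x => pvProcA pvPrimeTab (x.toNat + 1) x.toNat st)
      ((Array.replicate 100002 0 : Array ℕ), 0)).2 : Int) = _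
  rw [hfin.2.2.2]

lemma pvB_val (a : List Int) :
    longest_array_alt a = ((pvF (pvMtot a) : ℕ) : Int) := by
  have h0 : pvInvB ((PySem.Dict.empty : PySem.Dict ℕ ℕ), (0:ℕ)) 0 := by
    refine ⟨fun p => ?_, by simp [pvF]⟩
    rfl
  have hfin := pvFoldB a _ 0 h0
  rw [zero_add] at hfin
  show ((a.foldl (fun st x => pvFinishB (pvTrialB (x.toNat + 2) x.toNat 2 st))
      ((PySem.Dict.empty : PySem.Dict ℕ ℕ), 0)).2 : Int) = _
  rw [hfin.2]

-- ===== VERDICT =====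
theorem longest_array_spec : Claim_equal_longest_array := by
  intro a _ hPre
  unfold Spec_longest_array
  rw [pvA_val a hPre, pvB_val a]

def longest_array_raises : Claim_raises_longest_array := by
  unfold Claim_raises_longest_array
  constructor
  · rintro a _ ⟨x, hx, hgt⟩ hPre
    exact absurd (hPre x hx) (by omega)
  · refine ⟨by decide, ⟨100003, by decide, by decide⟩, ?_⟩
    set_option maxRecDepth 8000 in decide
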